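-- pv_equiv track=rewrite | github.com/luposdate3000/luposdate3000 | src/machinelearning/mycontour.py | myoptimize
-- ===== SOURCE A (Python) =====
-- def myoptimize(pp3,flag=True):
--     pp2=pp3
--     pp = []
--     while len(pp2) != len(pp):
--         pp = pp2
--         pp2 = []
--         for p in pp:
--             if len(pp2) < 2:
--                 pp2.append(p)
--             elif pp2[-2] == p:
--                 pp2.pop()
--             else:
--                 pp2.append(p)
--     if flag:
--      mid=int(len(pp2)/2)
--      pp4=pp2[mid:]
--      pp4.extend(pp2[:mid])
--      pp2=myoptimize(pp4,False)
--     return pp2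
-- ===== SOURCE B (Python) =====
-- def _reduce(ps):
--     st = []
--     for p in ps:
--         if len(st) > 1 and st[-2] == p:
--             st.pop()
--         else:
--             st.append(p)
--     return st
--
-- def myoptimize(pp3, flag=True):
--     r = _reduce(pp3)
--     if flag:
--         mid = len(r) // 2
--         r = _reduce(r[mid:] + r[:mid])
--     return r
-- ===== Notes on version B (the rewrite author's own statement) =====
-- stated objective: simpler
-- what changed: Replaced A's repeat-until-length-stable outer while loop and the recursive call for the rotation step by a single stack pass (one pass provably reaches the fixpoint, proved via a reduced-stack invariant), applied once and, when flag is set, once more on the list rotated by len//2.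
import Mathlib
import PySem

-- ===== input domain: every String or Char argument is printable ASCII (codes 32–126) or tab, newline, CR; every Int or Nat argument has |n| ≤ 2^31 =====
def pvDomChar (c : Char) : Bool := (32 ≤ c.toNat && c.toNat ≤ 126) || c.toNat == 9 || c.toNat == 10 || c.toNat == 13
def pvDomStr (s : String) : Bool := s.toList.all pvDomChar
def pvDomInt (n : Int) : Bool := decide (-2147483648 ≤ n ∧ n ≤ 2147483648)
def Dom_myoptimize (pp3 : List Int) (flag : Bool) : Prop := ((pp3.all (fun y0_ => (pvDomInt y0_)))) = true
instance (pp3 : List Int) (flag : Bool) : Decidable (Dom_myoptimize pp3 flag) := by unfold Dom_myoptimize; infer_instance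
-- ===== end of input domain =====

-- B replaces A's repeat-until-length-stable outer while loop and the recursive call for the
-- rotation step by a single stack pass (one pass already reaches the fixpoint, proved below via a
-- 'reduced stack' invariant), applied once and, when flag is set, once more on the rotated list;
-- objective: simpler. Neither version mutates its argument.

-- ===== PORT A =====
-- one step of A's inner 'for p in pp' loop body: state is pp2, processing point p
def stepA (pp2 : List Int) (p : Int) : List Int :=
  if pp2.length < 2 then pp2 ++ [p]
  else if PySem.List.pyGet? pp2 (-2) = some p then pp2.dropLast
  else pp2 ++ [p]

-- one execution of A's inner for loop starting from pp2 = []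
def passA (pp : List Int) : List Int := pp.foldl stepA []

-- termination helper for the while loop: a pass never lengthens the list
theorem stepA_len_le (acc : List Int) (p : Int) : (stepA acc p).length ≤ acc.length + 1 := by
  unfold stepA; split_ifs <;> simp <;> omega

theorem foldA_len_le (l acc : List Int) : (l.foldl stepA acc).length ≤ acc.length + l.length := by
  induction l generalizing acc with
  | nil => simp
  | cons p l ih =>
    have h1 := stepA_len_le acc p
    have h2 := ih (stepA acc p)
    simp only [List.foldl_cons, List.length_cons]
    omega

theorem passA_len_le (l : List Int) : (passA l).length ≤ l.length := by
  have := foldA_len_le l []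
  simpa [passA] using this

-- A's 'while len(pp2) != len(pp)' loop
def loopA (pp pp2 : List Int) : List Int :=
  if _h : pp2.length ≠ pp.length then loopA pp2 (passA pp2) else pp2
termination_by pp2.length + (if pp2.length = pp.length then 0 else 1)
decreasing_by
  have h := passA_len_le pp2
  split_ifs <;> omega

def myoptimize (pp3 : List Int) (flag : Bool) : List Int :=
  let pp2 := loopA [] pp3
  if flag then
    -- int(len(pp2)/2): true division of a nonnegative length then truncation = floor division
    let mid := PySem.Int.floordiv (pp2.length : Int) 2
    let pp4 := PySem.List.slice pp2 (some mid) none ++ PySem.List.slice pp2 none (some mid)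
    myoptimize pp4 false
  else pp2
termination_by (if flag then 1 else 0)
decreasing_by simp_all

-- ===== PORT B =====
-- B's single stack pass (Source B's _reduce)
def stepB (st : List Int) (p : Int) : List Int :=
  if 1 < st.length ∧ PySem.List.pyGet? st (-2) = some p then st.dropLast else st ++ [p]

def reduceB (ps : List Int) : List Int := ps.foldl stepB []

def myoptimize_alt (pp3 : List Int) (flag : Bool) : List Int :=
  let r := reduceB pp3
  if flag then
    let mid := r.length / 2
    reduceB (r.drop mid ++ r.take mid)
  else r

-- ===== PRECONDITION & SPEC =====
def Spec_myoptimize (pp3 : List Int) (flag : Bool) (out : List Int) : Prop := out = myoptimize_alt pp3 flag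
instance (pp3 : List Int) (flag : Bool) (out : List Int) : Decidable (Spec_myoptimize pp3 flag out) := by unfold Spec_myoptimize; infer_instance

-- ===== CLAIM (what is proved, stated in full; the proofs are below) =====
def Claim_equal_myoptimize : Prop := ∀ (pp3 : List Int) (flag : Bool), Dom_myoptimize pp3 flag → Spec_myoptimize pp3 flag (myoptimize pp3 flag)

-- ===== LEMMAS AND PROOFS =====

-- B's reshaped branch structure coincides with A's three-way branch
theorem stepB_eq_stepA (acc : List Int) (p : Int) : stepB acc p = stepA acc p := by
  unfold stepA stepB
  by_cases h : acc.length < 2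
  · rw [if_pos h, if_neg]; omega
  · rw [if_neg h]
    by_cases hg : PySem.List.pyGet? acc (-2) = some p
    · rw [if_pos hg, if_pos ⟨by omega, hg⟩]
    · rw [if_neg hg, if_neg (by tauto)]

theorem reduceB_eq_passA (l : List Int) : reduceB l = passA l := by
  have h : stepB = stepA := funext fun acc => funext fun p => stepB_eq_stepA acc p
  rw [reduceB, passA, h]

-- proof-side view of the stack kept top-first (head = latest point), to state the invariant
def stepT (st : List Int) (p : Int) : List Int :=
  if 2 ≤ st.length ∧ PySem.List.pyGet? st 1 = some p then st.drop 1 else p :: st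

theorem pyGet_pen (xs : List Int) (x y : Int) :
    PySem.List.pyGet? (xs ++ [x, y]) (-2) = some x := by
  rw [PySem.List.pyGet?_neg_ofNat _ 2 (by omega) (by simp)]
  simp [List.getElem?_append_right]

-- A's step on the reversed stack is the top-first step
theorem stepA_rev (st : List Int) (p : Int) : stepA st.reverse p = (stepT st p).reverse := by
  match st with
  | [] => simp [stepA, stepT]
  | [a] => simp [stepA, stepT]
  | a :: b :: t =>
    have hget1 : PySem.List.pyGet? (a :: b :: t) 1 = some b := by
      simp [PySem.List.pyGet?, PySem.List.pyIdx?]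
    by_cases hbp : b = p
    · simp [stepA, stepT, hget1, hbp, pyGet_pen]
    · simp [stepA, stepT, hget1, hbp, pyGet_pen]

theorem foldA_rev (l : List Int) : ∀ st : List Int,
    l.foldl stepA st.reverse = (l.foldl stepT st).reverse := by
  induction l with
  | nil => intro st; rfl
  | cons p l ih =>
    intro st
    simp only [List.foldl_cons, stepA_rev]
    exact ih (stepT st p)

theorem passA_eq_revT (l : List Int) : passA l = (l.foldl stepT []).reverse := by
  have := foldA_rev l []
  simpa [passA] using this

-- reduced stacks (top-first): no element equals the one two below it
inductive Red : List Int → Prop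
  | nil : Red []
  | single (a : Int) : Red [a]
  | pair (a b : Int) : Red [a, b]
  | cons (a b c : Int) (t : List Int) : a ≠ c → Red (b :: c :: t) → Red (a :: b :: c :: t)

theorem Red.tail {x : Int} {l : List Int} (h : Red (x :: l)) : Red l := by
  cases h with
  | single => exact Red.nil
  | pair => exact Red.single _
  | cons _ _ _ _ _ h2 => exact h2

theorem stepT_red {st : List Int} (p : Int) (h : Red st) : Red (stepT st p) := by
  unfold stepT
  split_ifs with hc
  · match st, h with
    | a :: t, h => exact h.tail
    | [], _ => simp at hc
  · match st, h with
    | [], _ => exact Red.single p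
    | [a], _ => exact Red.pair p a
    | a :: b :: t, h =>
      refine Red.cons p a b t ?_ h
      intro hpb
      exact hc ⟨by simp, by simp [PySem.List.pyGet?, PySem.List.pyIdx?, hpb]⟩

theorem foldT_red (l : List Int) : ∀ st : List Int, Red st → Red (l.foldl stepT st) := by
  induction l with
  | nil => intro st h; exact h
  | cons p l ih => intro st h; exact ih _ (stepT_red p h)

-- replaying a reduced stack bottom-to-top rebuilds it unchanged
theorem red_replay {st : List Int} (h : Red st) : st.reverse.foldl stepT [] = st := by
  rw [List.foldl_reverse]
  induction st with
  | nil => rfl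
  | cons a t ih =>
    have htail := h.tail
    simp only [List.foldr_cons, ih htail]
    match t, h with
    | [], _ => rfl
    | [x], _ => rfl
    | b :: c :: t', h =>
      cases h with
      | cons _ _ _ _ hne _ =>
        unfold stepT
        rw [if_neg]
        intro ⟨_, hget⟩
        simp [PySem.List.pyGet?, PySem.List.pyIdx?] at hget
        exact hne hget.symm

theorem passA_idem (l : List Int) : passA (passA l) = passA l := by
  rw [passA_eq_revT l, passA_eq_revT ((l.foldl stepT []).reverse),
      red_replay (foldT_red l [] Red.nil)]

theorem loopA_fix (pp l : List Int) : loopA pp (passA l) = passA l := by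
  rw [loopA]
  split_ifs with h
  · rw [passA_idem, loopA]; simp
  · rfl

theorem loopA_nil (l : List Int) : loopA [] l = passA l := by
  rw [loopA]
  split_ifs with h
  · exact loopA_fix l l
  · have : l = [] := by simpa using h
    subst this; rfl

theorem myoptimize_false (l : List Int) : myoptimize l false = passA l := by
  rw [myoptimize]
  simp [loopA_nil]

-- ===== VERDICT (by name: the statement is the Claim_ definition above) =====
theorem myoptimize_spec : Claim_equal_myoptimize := by
  intro pp3 flag _
  unfold Spec_myoptimize
  cases flag with
  | false =>
    rw [myoptimize_false]
    simp [myoptimize_alt, reduceB_eq_passA]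
  | true =>
    rw [myoptimize]
    rw [myoptimize_false, loopA_nil]
    have hmid : PySem.Int.floordiv ((passA pp3).length : Int) 2
        = (((passA pp3).length / 2 : Nat) : Int) := by
      exact_mod_cast PySem.Int.floordiv_natCast (passA pp3).length 2
    rw [hmid, PySem.List.slice_from_natCast, PySem.List.slice_to_natCast]
    simp [myoptimize_alt, reduceB_eq_passA]
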